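-- pv_equiv track=rewrite | github.com/XzenithAI/VX-Ultima | vx_advanced_core.py | _detect_circular_reasoning
-- ===== SOURCE A (Python) =====
-- from typing import Dict, List, Set, Tuple, Optional, Any, Callable
--
-- def _detect_circular_reasoning(trace: List[Dict]) -> bool:
--     """Detect circular dependencies in reasoning"""
--     # Simplified check: look for repeated patterns
--     if len(trace) < 3:
--         return False
--
--     seen = set()
--     for step in trace:
--         step_sig = str(step.get('conclusion', ''))
--         if step_sig in seen:
--             return True
--         seen.add(step_sig)
--     return False
-- ===== SOURCE B (Python) =====
-- from typing import Dict, List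
--
-- def _detect_circular_reasoning(trace: List[Dict]) -> bool:
--     """Detect circular dependencies in reasoning"""
--     if len(trace) < 3:
--         return False
--     sigs = sorted(str(step.get('conclusion', '')) for step in trace)
--     return any(a == b for a, b in zip(sigs, sigs[1:]))
-- ===== Notes on version B (the rewrite author's own statement) =====
-- stated objective: alternative
-- what changed: Replaces the hash-set early-exit scan by a sort-then-adjacent-scan: sort the conclusion signatures and report a duplicate iff two neighbours in the sorted list are equal.
import Mathlib
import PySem

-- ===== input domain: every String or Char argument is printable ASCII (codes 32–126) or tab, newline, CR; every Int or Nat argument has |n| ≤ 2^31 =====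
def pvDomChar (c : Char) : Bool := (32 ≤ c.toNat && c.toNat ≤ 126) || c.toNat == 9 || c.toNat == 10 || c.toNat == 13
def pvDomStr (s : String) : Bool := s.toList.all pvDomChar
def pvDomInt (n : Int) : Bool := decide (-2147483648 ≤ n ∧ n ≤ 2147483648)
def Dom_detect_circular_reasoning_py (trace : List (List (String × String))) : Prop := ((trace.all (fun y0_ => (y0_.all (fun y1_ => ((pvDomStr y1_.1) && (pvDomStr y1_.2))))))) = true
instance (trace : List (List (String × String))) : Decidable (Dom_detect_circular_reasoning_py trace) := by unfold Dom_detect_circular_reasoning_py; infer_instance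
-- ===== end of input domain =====

-- B replaces A's hash-set early-exit scan with sort-then-adjacent-scan over the
-- conclusion signatures (objective: alternative algorithm, same result).

-- ===== PORT A =====
-- the for-loop of A: running 'seen' set, return True on first repeated signature
def detectLoopA (steps : List (List (String × String))) (seen : PySem.Set String) : Bool :=
  match steps with
  | [] => false
  | step :: rest =>
      let step_sig := (step.lookup "conclusion").getD ""
      if PySem.Set.contains seen step_sig then true
      else detectLoopA rest (PySem.Set.add seen step_sig)

def detect_circular_reasoning_py (trace : List (List (String × String))) : Bool :=
  if trace.length < 3 then false
  else detectLoopA trace PySem.Set.empty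

-- ===== PORT B =====
-- 'any(a == b for a, b in zip(sigs, sigs[1:]))' on the sorted list
def adjDup : List String → Bool
  | a :: b :: t => a == b || adjDup (b :: t)
  | _ => false

def detect_circular_reasoning_py_alt (trace : List (List (String × String))) : Bool :=
  if trace.length < 3 then false
  else
    let sigs := PySem.List.sorted (trace.map (fun step => (step.lookup "conclusion").getD "")) (fun x => x) false
    adjDup sigs

-- ===== PRECONDITION & SPEC =====
def Spec_detect_circular_reasoning_py (trace : List (List (String × String))) (out : Bool) : Prop := out = detect_circular_reasoning_py_alt trace
instance (trace : List (List (String × String))) (out : Bool) : Decidable (Spec_detect_circular_reasoning_py trace out) := by unfold Spec_detect_circular_reasoning_py; infer_instance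

-- ===== CLAIM (what is proved, stated in full; the proofs are below) =====
def Claim_equal_detect_circular_reasoning_py : Prop := ∀ (trace : List (List (String × String))), Dom_detect_circular_reasoning_py trace → Spec_detect_circular_reasoning_py trace (detect_circular_reasoning_py trace)

-- ===== LEMMAS AND PROOFS =====

-- A's loop detects exactly a violation of Nodup of seen ++ signatures
theorem detectLoopA_eq_not_nodup (steps : List (List (String × String)))
    (seen : PySem.Set String) (hseen : seen.Nodup) :
    detectLoopA steps seen
      = !((seen ++ steps.map (fun step => (step.lookup "conclusion").getD "")).Nodup : Bool) := by
  induction steps generalizing seen with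
  | nil => simp [detectLoopA, hseen]
  | cons step rest ih =>
      simp only [detectLoopA, List.map_cons]
      by_cases hmem : ((step.lookup "conclusion").getD "") ∈ seen
      · rw [if_pos (by simpa [PySem.Set.contains_iff] using hmem)]
        have : ¬ (seen ++ (step.lookup "conclusion").getD "" ::
            rest.map (fun s => (s.lookup "conclusion").getD "")).Nodup := by
          intro h
          rw [List.nodup_append] at h
          exact h.2.2 _ hmem _ (by simp) rfl
        simp [this]
      · rw [if_neg (by simpa [PySem.Set.contains_iff] using hmem)]
        rw [PySem.Set.add_of_not_mem hmem]
        have hnd : (seen ++ [(step.lookup "conclusion").getD ""]).Nodup := by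
          simp only [List.nodup_append]
          refine ⟨hseen, List.nodup_singleton _, ?_⟩
          intro a ha b hb hab
          simp only [List.mem_singleton] at hb
          subst hab
          subst hb
          exact hmem ha
        rw [ih (seen ++ [(step.lookup "conclusion").getD ""]) hnd]
        rw [List.append_assoc]
        rfl

-- in a ≤-sorted list, no adjacent duplicates means no duplicates at all
theorem adjDup_eq_not_nodup : ∀ (xs : List String), xs.Pairwise (· ≤ ·) →
    adjDup xs = !(xs.Nodup : Bool)
  | [], _ => by simp [adjDup]
  | [a], _ => by simp [adjDup]
  | a :: b :: t, hs => by
      have hpt : (b :: t).Pairwise (· ≤ ·) := hs.tail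
      have ih := adjDup_eq_not_nodup (b :: t) hpt
      by_cases hab : a = b
      · subst hab
        simp [adjDup, List.nodup_cons]
      · have habne : (a == b) = false := by simp [hab]
        have hmem : a ∉ b :: t := by
          intro hm
          rcases List.mem_cons.mp hm with h | h
          · exact hab h
          · have hba : b ≤ a := (List.pairwise_cons.mp hpt).1 a h
            have hab' : a ≤ b := (List.pairwise_cons.mp hs).1 b (by simp)
            exact hab (le_antisymm hab' hba)
        rw [show adjDup (a :: b :: t) = ((a == b) || adjDup (b :: t)) from rfl,
          habne, Bool.false_or, ih]
        simp [List.nodup_cons, hmem]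
  termination_by xs => xs.length

-- ===== VERDICT (by name: the statement is the Claim_ definition above) =====
theorem detect_circular_reasoning_py_spec : Claim_equal_detect_circular_reasoning_py := by
  intro trace _
  unfold Spec_detect_circular_reasoning_py detect_circular_reasoning_py
    detect_circular_reasoning_py_alt
  by_cases h3 : trace.length < 3
  · simp [h3]
  · rw [if_neg h3, if_neg h3]
    rw [detectLoopA_eq_not_nodup trace PySem.Set.empty List.nodup_nil]
    set sigs := trace.map (fun step => (step.lookup "conclusion").getD "") with hsigs
    have hperm : (PySem.List.sorted sigs (fun x => x) false).Perm sigs :=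
      PySem.List.sorted_perm sigs (fun x => x) false
    have hpw : (PySem.List.sorted sigs (fun x => x) false).Pairwise (· ≤ ·) := by
      simpa using PySem.List.sorted_pairwise sigs (fun x => x)
    rw [adjDup_eq_not_nodup _ hpw]
    simp [hperm.nodup_iff]
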